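-- pv_equiv track=rewrite | github.com/Abdulrahman-Al-Hasbani-UCLL/exercises | 01-basic-python/03-loops/03-coins/student.py | coins
-- ===== SOURCE A (Python) =====
-- def coins(one, two, five, goal):
--     one_true = False
--     for i in range(one+1):
--         for j in range(two+1):
--             for k in range(five+1):
--                 if (i*1)+(j*2)+(k*5) == goal:
--                     one_true = True
--     return one_true
-- ===== SOURCE B (Python) =====
-- def coins(one, two, five, goal):
--     if one < 0:
--         return False
--     for j in range(two + 1):
--         for k in range(five + 1):
--             rest = goal - 2 * j - 5 * k
--             if 0 <= rest <= one:
--                 return True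
--     return False
-- ===== Notes on version B (the rewrite author's own statement) =====
-- stated objective: faster
-- what changed: B drops the innermost loop over ones: it iterates only over twos and fives and checks arithmetically whether the remainder lies in [0, one], returning early on the first hit.
import Mathlib
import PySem

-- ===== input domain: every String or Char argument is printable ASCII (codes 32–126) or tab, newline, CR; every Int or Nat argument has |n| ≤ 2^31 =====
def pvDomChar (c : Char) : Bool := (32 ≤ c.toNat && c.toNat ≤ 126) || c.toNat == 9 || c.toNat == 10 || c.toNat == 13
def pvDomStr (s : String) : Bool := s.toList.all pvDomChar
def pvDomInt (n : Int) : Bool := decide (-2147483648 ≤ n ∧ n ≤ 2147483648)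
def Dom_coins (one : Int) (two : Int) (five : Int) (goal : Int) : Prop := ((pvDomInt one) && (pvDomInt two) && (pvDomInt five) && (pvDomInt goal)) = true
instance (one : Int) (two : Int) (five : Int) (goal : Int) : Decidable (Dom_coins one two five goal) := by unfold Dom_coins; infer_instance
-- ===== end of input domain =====

-- B drops A's innermost loop over the one-coins: it scans only twos and fives and checks
-- arithmetically whether the remainder lies in [0, one] (faster: O(two*five) vs O(one*two*five)).


-- ===== PORT A =====
-- literal transliteration: triple nested for-loops setting a flag, never breaking
def coins (one : Int) (two : Int) (five : Int) (goal : Int) : Bool :=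
  (PySem.List.pyRange 0 (one + 1) 1).foldl (fun acc1 i =>
    (PySem.List.pyRange 0 (two + 1) 1).foldl (fun acc2 j =>
      (PySem.List.pyRange 0 (five + 1) 1).foldl (fun acc3 k =>
        if i * 1 + j * 2 + k * 5 == goal then true else acc3) acc2) acc1) false

-- ===== PORT B =====
-- nested loops over twos and fives with an early `return True` = List.any
def coins_alt (one : Int) (two : Int) (five : Int) (goal : Int) : Bool :=
  if one < 0 then false else
  (PySem.List.pyRange 0 (two + 1) 1).any (fun j =>
    (PySem.List.pyRange 0 (five + 1) 1).any (fun k =>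
      let rest := goal - 2 * j - 5 * k
      decide (0 ≤ rest ∧ rest ≤ one)))

-- ===== PRECONDITION & SPEC =====
def Spec_coins (one : Int) (two : Int) (five : Int) (goal : Int) (out : Bool) : Prop := out = coins_alt one two five goal
instance (one : Int) (two : Int) (five : Int) (goal : Int) (out : Bool) : Decidable (Spec_coins one two five goal out) := by unfold Spec_coins; infer_instance

-- ===== CLAIM (what is proved, stated in full; the proofs are below) =====
def Claim_equal_coins : Prop := ∀ (one : Int) (two : Int) (five : Int) (goal : Int), Dom_coins one two five goal → Spec_coins one two five goal (coins one two five goal)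

-- ===== LEMMAS AND PROOFS =====

theorem foldl_ite_true {α : Type} (p : α → Bool) (xs : List α) (b : Bool) :
    xs.foldl (fun acc x => if p x then true else acc) b = (b || xs.any p) := by
  induction xs generalizing b with
  | nil => simp
  | cons x xs ih =>
    simp only [List.foldl_cons, List.any_cons, ih]
    by_cases h : p x = true <;> simp [h]

theorem foldl_or {α : Type} (g : α → Bool) (xs : List α) (b : Bool) :
    xs.foldl (fun acc x => acc || g x) b = (b || xs.any g) := by
  induction xs generalizing b with
  | nil => simp
  | cons x xs ih => simp [List.foldl_cons, ih, Bool.or_assoc]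

theorem coins_eq_any (one two five goal : Int) :
    coins one two five goal =
      (PySem.List.pyRange 0 (one + 1) 1).any (fun i =>
        (PySem.List.pyRange 0 (two + 1) 1).any (fun j =>
          (PySem.List.pyRange 0 (five + 1) 1).any (fun k =>
            i * 1 + j * 2 + k * 5 == goal))) := by
  unfold coins
  simp only [foldl_ite_true, foldl_or, Bool.false_or]

theorem coins_spec' (one two five goal : Int) :
    coins one two five goal = coins_alt one two five goal := by
  rw [coins_eq_any]
  unfold coins_alt
  by_cases hneg : one < 0
  · rw [if_pos hneg, PySem.List.pyRange_one_eq_nil (by omega), List.any_nil]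
  rw [if_neg hneg]
  rw [Bool.eq_iff_iff]
  simp only [List.any_eq_true, PySem.List.mem_pyRange_one, beq_iff_eq, decide_eq_true_eq]
  constructor
  · rintro ⟨i, ⟨hi0, hi1⟩, j, ⟨hj0, hj1⟩, k, ⟨hk0, hk1⟩, heq⟩
    exact ⟨j, ⟨hj0, hj1⟩, k, ⟨hk0, hk1⟩, by omega⟩
  · rintro ⟨j, ⟨hj0, hj1⟩, k, ⟨hk0, hk1⟩, hr0, hr1⟩
    exact ⟨goal - 2 * j - 5 * k, ⟨hr0, by omega⟩, j, ⟨hj0, hj1⟩, k, ⟨hk0, hk1⟩, by omega⟩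

-- ===== VERDICT (by name: the statement is the Claim_ definition above) =====
theorem coins_spec : Claim_equal_coins := by
  intro one two five goal _
  exact coins_spec' one two five goal
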